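-- pv_equiv track=rewrite | github.com/youandpython/BreakWindPlan | utils/metro_timetable.py | get_route_name
-- ===== SOURCE A (Python) =====
-- def get_route_name(routes, route_name):
--     """获取地铁线路名称"""
--
--     if len(route_name) == 0:
--         return route_name
--     route_name = route_name.upper()
--     a = [a for a in routes if a.startswith(route_name)]
--     if len(a) >= 1:
--         return a[0]
--
--     a = [a for a in routes if route_name in a]
--     return a[0] if len(a) >= 1 else route_name
-- ===== SOURCE B (Python) =====
-- def get_route_name(routes, route_name):
--     """获取地铁线路名称"""
--     if len(route_name) == 0:
--         return route_name
--     route_name = route_name.upper()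
--     prefix_hit = None
--     substr_hit = None
--     for r in routes:
--         if prefix_hit is None and r.startswith(route_name):
--             prefix_hit = r
--         if substr_hit is None and route_name in r:
--             substr_hit = r
--     if prefix_hit is not None:
--         return prefix_hit
--     if substr_hit is not None:
--         return substr_hit
--     return route_name
-- ===== Notes on version B (the rewrite author's own statement) =====
-- stated objective: alternative
-- what changed: Replaced A's two separate list-comprehension scans (prefix matches, then substring matches) by a single pass over routes maintaining first-prefix-hit and first-substring-hit accumulators, deciding priority after the loop.
import Mathlib
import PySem

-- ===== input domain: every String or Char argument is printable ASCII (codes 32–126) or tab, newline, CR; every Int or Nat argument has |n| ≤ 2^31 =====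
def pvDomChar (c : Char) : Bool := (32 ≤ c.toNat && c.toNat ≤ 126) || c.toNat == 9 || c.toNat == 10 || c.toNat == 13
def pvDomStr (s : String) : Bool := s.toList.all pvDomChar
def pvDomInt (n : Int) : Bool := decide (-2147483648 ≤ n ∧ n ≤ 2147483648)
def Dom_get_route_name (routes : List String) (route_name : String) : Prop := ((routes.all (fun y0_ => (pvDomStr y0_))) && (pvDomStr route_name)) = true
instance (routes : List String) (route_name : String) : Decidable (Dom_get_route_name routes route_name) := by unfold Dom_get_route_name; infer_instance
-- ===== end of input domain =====

-- B collapses A's two list-comprehension scans into one pass keeping the first prefix hit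
-- and the first substring hit; same return value (alternative decomposition, not faster).

-- ===== PORT A =====
def get_route_name (routes : List String) (route_name : String) : String :=
  if PySem.Str.len route_name == 0 then route_name
  else
    let rn := PySem.Str.upper route_name
    let a := routes.filter (fun r => PySem.Str.startswith r rn)
    match a with
    | x :: _ => x
    | [] =>
      let a2 := routes.filter (fun r => PySem.Str.isIn rn r)
      match a2 with
      | x :: _ => x
      | [] => rn

-- ===== PORT B =====
def get_route_name_alt (routes : List String) (route_name : String) : String :=
  if PySem.Str.len route_name == 0 then route_name
  else
    let rn := PySem.Str.upper route_name
    let hits := routes.foldl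
      (fun (acc : Option String × Option String) r =>
        (if acc.1.isNone && PySem.Str.startswith r rn then some r else acc.1,
         if acc.2.isNone && PySem.Str.isIn rn r then some r else acc.2))
      (none, none)
    match hits.1 with
    | some v => v
    | none =>
      match hits.2 with
      | some v => v
      | none => rn

-- ===== PRECONDITION & SPEC =====
def Spec_get_route_name (routes : List String) (route_name : String) (out : String) : Prop := out = get_route_name_alt routes route_name
instance (routes : List String) (route_name : String) (out : String) : Decidable (Spec_get_route_name routes route_name out) := by unfold Spec_get_route_name; infer_instance

-- ===== CLAIM (what is proved, stated in full; the proofs are below) =====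
def Claim_equal_get_route_name : Prop := ∀ (routes : List String) (route_name : String), Dom_get_route_name routes route_name → Spec_get_route_name routes route_name (get_route_name routes route_name)

-- ===== LEMMAS AND PROOFS =====

-- The single-pass fold computes, in each component, the first element satisfying the
-- corresponding predicate (unless the accumulator already holds one).
theorem foldl_first_hits (p q : String → Bool) (l : List String) (a b : Option String) :
    l.foldl
      (fun (acc : Option String × Option String) r =>
        (if acc.1.isNone && p r then some r else acc.1,
         if acc.2.isNone && q r then some r else acc.2))
      (a, b)
    = ((a.or (l.filter p).head?), (b.or (l.filter q).head?)) := by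
  induction l generalizing a b with
  | nil => simp
  | cons x xs ih =>
    rw [List.foldl_cons, ih]
    cases a <;> cases b <;>
      by_cases hp : p x <;> by_cases hq : q x <;>
        simp [List.filter_cons, hp, hq]

theorem get_route_name_spec' : ∀ (routes : List String) (route_name : String),
    get_route_name routes route_name = get_route_name_alt routes route_name := by
  intro routes route_name
  simp only [get_route_name, get_route_name_alt]
  by_cases h : (PySem.Str.len route_name == 0) = true
  · rw [if_pos h, if_pos h]
  · rw [if_neg h, if_neg h, foldl_first_hits]
    cases hf : routes.filter (fun r => PySem.Str.startswith r (PySem.Str.upper route_name)) <;>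
      cases hg : routes.filter (fun r => PySem.Str.isIn (PySem.Str.upper route_name) r) <;>
        simp [hf, hg]

-- ===== VERDICT (by name: the statement is the Claim_ definition above) =====
theorem get_route_name_spec : Claim_equal_get_route_name := by
  intro routes route_name _
  exact get_route_name_spec' routes route_name
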